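-- pv_equiv track=rewrite | github.com/H432a/Myszkowski-cipher-cia | cia.py | dice_hash
-- ===== SOURCE A (Python) =====
-- def dice_hash(text):
--     x, y = 0, 0
--     path_sum = 0
--     MOD = 10**9 + 7
--
--     for i, ch in enumerate(text):
--         dice = (ord(ch) % 6) + 1
--
--         if dice == 1:
--             dx, dy = 0, 1
--         elif dice == 2:
--             dx, dy = 0, -1
--         elif dice == 3:
--             dx, dy = 1, 0
--         elif dice == 4:
--             dx, dy = -1, 0
--         elif dice == 5:
--             dx, dy = 1, 1
--         else:
--             dx, dy = -1, -1
--
--         x += dx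
--         y += dy
--
--         path_sum += (x*x + y*y + i)
--         path_sum %= MOD
--
--     final_hash = (x * 31 + y * 37 + path_sum) % MOD
--     return final_hash, x, y
-- ===== SOURCE B (Python) =====
-- _DELTAS = [(0, 1), (0, -1), (1, 0), (-1, 0), (1, 1), (-1, -1)]
-- _MOD = 10**9 + 7
--
--
-- def _prefix(vals, start):
--     out = []
--     t = start
--     for v in vals:
--         t += v
--         out.append(t)
--     return out
--
--
-- def dice_hash(text):
--     moves = [_DELTAS[ord(ch) % 6] for ch in text]
--     xs = _prefix([dx for dx, dy in moves], 0)
--     ys = _prefix([dy for dx, dy in moves], 0)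
--     x = xs[-1] if xs else 0
--     y = ys[-1] if ys else 0
--     path_sum = sum(xi * xi + yi * yi + i for i, (xi, yi) in enumerate(zip(xs, ys))) % _MOD
--     return (x * 31 + y * 37 + path_sum) % _MOD, x, y
-- ===== Notes on version B (the rewrite author's own statement) =====
-- stated objective: alternative
-- what changed: Replaces A's single interleaved (x,y,path_sum) accumulator loop with per-iteration mod by a displacement lookup table, two explicit prefix-sum passes building the full position sequences, and a separate indexed reduction with one final mod.
import Mathlib
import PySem

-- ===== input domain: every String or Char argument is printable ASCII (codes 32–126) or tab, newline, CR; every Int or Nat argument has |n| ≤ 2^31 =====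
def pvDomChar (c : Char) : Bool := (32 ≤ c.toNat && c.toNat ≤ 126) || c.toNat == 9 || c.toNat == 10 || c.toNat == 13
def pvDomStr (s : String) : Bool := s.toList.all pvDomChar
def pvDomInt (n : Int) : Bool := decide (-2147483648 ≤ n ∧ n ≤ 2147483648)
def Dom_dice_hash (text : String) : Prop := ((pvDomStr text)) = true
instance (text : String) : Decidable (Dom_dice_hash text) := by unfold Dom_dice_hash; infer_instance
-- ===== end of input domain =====

-- B replaces A's single interleaved accumulator loop by a delta table plus two prefix-sum
-- passes and a separate indexed reduction (objective: alternative decomposition, same cost).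

-- ===== PORT A =====
def dice_hash_step (st : Int × Int × Int) (p : Int × Char) : Int × Int × Int :=
  let dice : Int := PySem.Int.mod (Int.ofNat p.2.toNat) 6 + 1
  let d : Int × Int :=
    if dice == 1 then (0, 1)
    else if dice == 2 then (0, -1)
    else if dice == 3 then (1, 0)
    else if dice == 4 then (-1, 0)
    else if dice == 5 then (1, 1)
    else (-1, -1)
  let x := st.1 + d.1
  let y := st.2.1 + d.2
  (x, y, PySem.Int.mod (st.2.2 + (x * x + y * y + p.1)) (10 ^ 9 + 7))

def dice_hash (text : String) : Int × Int × Int :=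
  let st := (PySem.List.enumerate text.toList).foldl dice_hash_step (0, 0, 0)
  (PySem.Int.mod (st.1 * 31 + st.2.1 * 37 + st.2.2) (10 ^ 9 + 7), st.1, st.2.1)

-- ===== PORT B =====
def pvDeltas : List (Int × Int) := [(0, 1), (0, -1), (1, 0), (-1, 0), (1, 1), (-1, -1)]

def pvPrefix : List Int → Int → List Int
  | [], _ => []
  | v :: vs, t => (t + v) :: pvPrefix vs (t + v)

def dice_hash_alt (text : String) : Int × Int × Int :=
  let moves := text.toList.map (fun ch => pvDeltas.getD (ch.toNat % 6) (0, 0))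
  let xs := pvPrefix (moves.map Prod.fst) 0
  let ys := pvPrefix (moves.map Prod.snd) 0
  let x := xs.getLastD 0
  let y := ys.getLastD 0
  let ps := PySem.Int.mod (((PySem.List.enumerate (xs.zip ys)).map
      (fun p => p.2.1 * p.2.1 + p.2.2 * p.2.2 + p.1)).sum) (10 ^ 9 + 7)
  (PySem.Int.mod (x * 31 + y * 37 + ps) (10 ^ 9 + 7), x, y)

-- ===== PRECONDITION & SPEC =====
def Spec_dice_hash (text : String) (out : Int × Int × Int) : Prop := out = dice_hash_alt text
instance (text : String) (out : Int × Int × Int) : Decidable (Spec_dice_hash text out) := by unfold Spec_dice_hash; infer_instance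

-- ===== CLAIM (what is proved, stated in full; the proofs are below) =====
def Claim_equal_dice_hash : Prop := ∀ (text : String), Dom_dice_hash text → Spec_dice_hash text (dice_hash text)

-- ===== LEMMAS AND PROOFS =====

def pvDelta (ch : Char) : Int × Int := pvDeltas.getD (ch.toNat % 6) (0, 0)

lemma pvStep_eq (st : Int × Int × Int) (i : Int) (ch : Char) :
    dice_hash_step st (i, ch) =
      (st.1 + (pvDelta ch).1, st.2.1 + (pvDelta ch).2,
        PySem.Int.mod (st.2.2 + ((st.1 + (pvDelta ch).1) * (st.1 + (pvDelta ch).1) +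
          (st.2.1 + (pvDelta ch).2) * (st.2.1 + (pvDelta ch).2) + i)) (10 ^ 9 + 7)) := by
  have hmod : PySem.Int.mod (Int.ofNat ch.toNat) 6 = ((ch.toNat % 6 : Nat) : Int) := by
    rw [PySem.Int.mod_eq_emod_of_pos (by norm_num)]
    simp
  have hr : ch.toNat % 6 = 0 ∨ ch.toNat % 6 = 1 ∨ ch.toNat % 6 = 2 ∨ ch.toNat % 6 = 3 ∨
      ch.toNat % 6 = 4 ∨ ch.toNat % 6 = 5 := by omega
  rcases hr with h | h | h | h | h | h <;>
    · rw [h] at hmod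
      simp only [dice_hash_step, hmod]
      norm_num [pvDelta, pvDeltas, h]

-- running sum S as B computes it, generalized over start positions and start index
def pvS (l : List Char) (x0 y0 i0 : Int) : Int :=
  ((PySem.List.enumerate ((pvPrefix ((l.map pvDelta).map Prod.fst) x0).zip
      (pvPrefix ((l.map pvDelta).map Prod.snd) y0)) i0).map
    (fun p => p.2.1 * p.2.1 + p.2.2 * p.2.2 + p.1)).sum

lemma pvS_cons (ch : Char) (l : List Char) (x0 y0 i0 : Int) :
    pvS (ch :: l) x0 y0 i0 =
      ((x0 + (pvDelta ch).1) * (x0 + (pvDelta ch).1) +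
       (y0 + (pvDelta ch).2) * (y0 + (pvDelta ch).2) + i0) +
      pvS l (x0 + (pvDelta ch).1) (y0 + (pvDelta ch).2) (i0 + 1) := by
  simp [pvS, pvPrefix, PySem.List.enumerate_cons]

lemma pvFold_eq (l : List Char) : ∀ (x0 y0 q i0 : Int),
    (PySem.List.enumerate l i0).foldl dice_hash_step (x0, y0, PySem.Int.mod q (10 ^ 9 + 7)) =
      ((pvPrefix ((l.map pvDelta).map Prod.fst) x0).getLastD x0,
       (pvPrefix ((l.map pvDelta).map Prod.snd) y0).getLastD y0,
       PySem.Int.mod (q + pvS l x0 y0 i0) (10 ^ 9 + 7)) := by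
  induction l with
  | nil => intro x0 y0 q i0; simp [pvS, pvPrefix]
  | cons ch l ih =>
    intro x0 y0 q i0
    have hM : ((10 ^ 9 + 7 : Int)) > 0 := by norm_num
    rw [PySem.List.enumerate_cons]
    simp only [List.foldl_cons, pvStep_eq]
    have hmm : PySem.Int.mod (PySem.Int.mod q (10 ^ 9 + 7) +
        ((x0 + (pvDelta ch).1) * (x0 + (pvDelta ch).1) +
         (y0 + (pvDelta ch).2) * (y0 + (pvDelta ch).2) + i0)) (10 ^ 9 + 7) =
        PySem.Int.mod (q + ((x0 + (pvDelta ch).1) * (x0 + (pvDelta ch).1) +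
         (y0 + (pvDelta ch).2) * (y0 + (pvDelta ch).2) + i0)) (10 ^ 9 + 7) := by
      rw [PySem.Int.mod_eq_emod_of_pos hM, PySem.Int.mod_eq_emod_of_pos hM,
        PySem.Int.mod_eq_emod_of_pos hM, Int.emod_add_emod]
    rw [hmm, ih, pvS_cons]
    simp only [List.map_cons, pvPrefix, List.getLastD_cons]
    have : q + (((x0 + (pvDelta ch).1) * (x0 + (pvDelta ch).1) +
        (y0 + (pvDelta ch).2) * (y0 + (pvDelta ch).2) + i0) +
        pvS l (x0 + (pvDelta ch).1) (y0 + (pvDelta ch).2) (i0 + 1)) =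
        q + ((x0 + (pvDelta ch).1) * (x0 + (pvDelta ch).1) +
        (y0 + (pvDelta ch).2) * (y0 + (pvDelta ch).2) + i0) +
        pvS l (x0 + (pvDelta ch).1) (y0 + (pvDelta ch).2) (i0 + 1) := by ring
    rw [this]

-- ===== VERDICT (by name: the statement is the Claim_ definition above) =====
theorem dice_hash_spec : Claim_equal_dice_hash := by
  intro text _
  have hδ : (fun ch => pvDeltas.getD (ch.toNat % 6) ((0 : Int), (0 : Int))) = pvDelta := rfl
  have h := pvFold_eq text.toList 0 0 0 0
  have h0 : PySem.Int.mod (0 : Int) (10 ^ 9 + 7) = 0 := by decide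
  rw [h0] at h
  simp only [Spec_dice_hash, dice_hash, dice_hash_alt, hδ, h, pvS, zero_add]
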